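-- pv_equiv track=rewrite | github.com/davidrg/zxweather | weather_push/zxw_push/common/data_codecs.py | set_field_ids
-- ===== SOURCE A (Python) =====
-- def set_field_ids(field_ids):
--     """
--     Returns the supplied list of Field IDs as an integer
--
--     >>> set_field_ids([9])
--     512
--     >>> set_field_ids([])
--     0
--     >>> set_field_ids([0])
--     1
--     >>> set_field_ids([31])
--     2147483648L
--     >>> set_field_ids([0,1,2,3,4,5])
--     63
--
--     :param field_ids: List of field IDs to pack into a bit field
--     :type field_ids: list[int]
--     :return: Bit field containing field IDs
--     :rtype: int
--     """
--     ids = ''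
--
--     for field_id in range(0, 32):
--         if field_id in field_ids:
--             ids += '1'
--         else:
--             ids += '0'
--
--     return int(ids[::-1], 2)
-- ===== SOURCE B (Python) =====
-- def set_field_ids(field_ids):
--     # One pass over the distinct ids: set the bit for every in-range id.
--     # Out-of-range ids are ignored, exactly as in the original fixed 0..31 scan.
--     return sum(1 << i for i in set(field_ids) if 0 <= i < 32)
-- ===== Notes on version B (the rewrite author's own statement) =====
-- stated objective: faster
-- what changed: Instead of scanning all 32 bit slots and testing membership of each in the list, then building a binary string and parsing it with int(.,2), B dedups the input once with set() and sums 1<<i for each distinct in-range id directly.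
import Mathlib
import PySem

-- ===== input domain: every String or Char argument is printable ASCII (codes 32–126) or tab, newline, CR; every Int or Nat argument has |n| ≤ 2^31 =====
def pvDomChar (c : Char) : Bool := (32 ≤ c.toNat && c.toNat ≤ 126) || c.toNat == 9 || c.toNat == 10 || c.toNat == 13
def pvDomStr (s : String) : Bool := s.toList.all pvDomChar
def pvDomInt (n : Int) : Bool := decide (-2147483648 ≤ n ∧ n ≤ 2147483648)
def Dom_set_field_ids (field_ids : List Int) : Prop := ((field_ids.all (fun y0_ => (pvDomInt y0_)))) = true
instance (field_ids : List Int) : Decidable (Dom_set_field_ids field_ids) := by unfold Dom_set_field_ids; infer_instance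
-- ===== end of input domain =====

-- B replaces A's fixed scan of all 32 bit slots (each one a membership test of the whole
-- list) plus binary-string building and int(.,2) parsing by one pass over the distinct
-- input ids, summing 1 << i for the in-range ones; measurably faster on long lists.

-- ===== PORT A =====
-- Hand port of int(s, 2) for the one string A parses: `ids[::-1]` is always a NONEMPTY
-- list of '0'/'1' characters (no whitespace, sign, '0b' prefix or '_' can occur), and on
-- exactly those strings CPython's int(s, 2) is this left fold; it is exact there.
def pvIntOfBin (cs : List Char) : Int :=
  cs.foldl (fun acc c => acc * 2 + (if c = '1' then 1 else 0)) 0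

def set_field_ids (field_ids : List Int) : Int :=
  -- ids = ''; for field_id in range(0, 32): ids += '1' / '0'
  let ids : List Char :=
    (PySem.List.pyRange 0 32 1).foldl
      (fun ids field_id =>
        if field_ids.contains field_id then ids ++ ['1'] else ids ++ ['0']) []
  -- return int(ids[::-1], 2)   (ids[::-1] = ids.reverse)
  pvIntOfBin ids.reverse

-- ===== PORT B =====
def set_field_ids_alt (field_ids : List Int) : Int :=
  -- sum(1 << i for i in set(field_ids) if 0 <= i < 32); the guard makes i.toNat exact
  (((PySem.Set.ofList field_ids).filter (fun i => decide (0 ≤ i ∧ i < 32))).map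
      (fun i => (1 : Int) <<< i.toNat)).sum

-- ===== PRECONDITION & SPEC =====
def Spec_set_field_ids (field_ids : List Int) (out : Int) : Prop := out = set_field_ids_alt field_ids
instance (field_ids : List Int) (out : Int) : Decidable (Spec_set_field_ids field_ids out) := by unfold Spec_set_field_ids; infer_instance

-- ===== CLAIM (what is proved, stated in full; the proofs are below) =====
def Claim_equal_set_field_ids : Prop := ∀ (field_ids : List Int), Dom_set_field_ids field_ids → Spec_set_field_ids field_ids (set_field_ids field_ids)

-- ===== LEMMAS AND PROOFS =====

-- the binary-digit fold with an arbitrary accumulator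
theorem pvIntOfBin_shift (cs : List Char) (a : Int) :
    cs.foldl (fun acc c => acc * 2 + (if c = '1' then 1 else 0)) a
      = a * 2 ^ cs.length + pvIntOfBin cs := by
  induction cs generalizing a with
  | nil => simp [pvIntOfBin]
  | cons c t ih =>
    simp only [List.foldl_cons, List.length_cons, pvIntOfBin] at *
    rw [ih, ih (0 * 2 + _)]
    ring

-- A's reversed bit string read as the weighted sum of its bits
theorem pvIntOfBin_rev_map_range (g : Nat → Bool) (n : Nat) :
    pvIntOfBin (((List.range n).map (fun k => if g k then '1' else '0')).reverse)
      = ∑ i ∈ Finset.range n, (if g i then (2:Int) ^ i else 0) := by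
  induction n with
  | zero => simp [pvIntOfBin]
  | succ n ih =>
    rw [List.range_succ, List.map_append, List.reverse_append, Finset.sum_range_succ]
    simp only [List.map_cons, List.map_nil, List.reverse_cons, List.reverse_nil,
      List.nil_append, List.cons_append, pvIntOfBin, List.foldl_cons]
    rw [pvIntOfBin_shift]
    unfold pvIntOfBin at ih ⊢
    rw [ih]
    simp only [List.length_reverse, List.length_map, List.length_range]
    by_cases h : g n
    · simp [h]
      ring
    · simp [h]

-- A as a sum over the 32 bit slots
theorem set_field_ids_as_sum (field_ids : List Int) :
    set_field_ids field_ids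
      = ∑ i ∈ Finset.range 32, (if ((i : Int) ∈ field_ids) then (2:Int) ^ i else 0) := by
  unfold set_field_ids
  have hfun : (fun (ids : List Char) (field_id : Int) =>
        if field_ids.contains field_id then ids ++ ['1'] else ids ++ ['0'])
      = fun (ids : List Char) (field_id : Int) =>
        ids ++ [if field_ids.contains field_id then '1' else '0'] := by
    funext ids x
    split <;> rfl
  rw [hfun, PySem.List.foldl_append_singleton_eq_map]
  have h32 : (32 : Int) = ((32 : Nat) : Int) := by norm_num
  rw [h32, PySem.List.pyRange_zero_natCast, List.map_map]
  simp only [List.nil_append, Function.comp_def]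
  rw [pvIntOfBin_rev_map_range (fun k => field_ids.contains ((k : Nat) : Int)) 32]
  refine Finset.sum_congr rfl ?_
  intro i _
  by_cases h : (i : Int) ∈ field_ids <;> simp [h]

-- B as a sum over the distinct in-range ids
theorem set_field_ids_alt_as_sum (field_ids : List Int) :
    set_field_ids_alt field_ids
      = ∑ i ∈ Finset.range 32, (if ((i : Int) ∈ field_ids) then (2:Int) ^ i else 0) := by
  unfold set_field_ids_alt
  have hmap : ((PySem.Set.ofList field_ids).filter (fun i => decide (0 ≤ i ∧ i < 32))).map
        (fun i => (1 : Int) <<< i.toNat)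
      = ((PySem.Set.ofList field_ids).filter (fun i => decide (0 ≤ i ∧ i < 32))).map
        (fun i => (2 : Int) ^ i.toNat) := by
    refine List.map_congr_left ?_
    intro x _
    rw [Int.shiftLeft_eq_mul_pow, one_mul]
    push_cast
    rfl
  rw [hmap]
  rw [← List.sum_toFinset _ (List.Nodup.filter _ (PySem.Set.nodup_ofList field_ids))]
  rw [← Finset.sum_filter]
  refine (Finset.sum_nbij' (fun (x : Int) => x.toNat) (fun (n : Nat) => (n : Int))
    ?_ ?_ ?_ ?_ ?_)
  · intro x hx
    simp only [List.mem_toFinset, List.mem_filter, PySem.Set.mem_ofList,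
      decide_eq_true_eq] at hx
    simp only [Finset.mem_filter, Finset.mem_range]
    obtain ⟨hmem, h0, h32⟩ := hx
    refine ⟨by omega, ?_⟩
    rwa [Int.toNat_of_nonneg h0]
  · intro n hn
    simp only [Finset.mem_filter, Finset.mem_range] at hn
    simp only [List.mem_toFinset, List.mem_filter, PySem.Set.mem_ofList,
      decide_eq_true_eq]
    exact ⟨hn.2, by omega, by exact_mod_cast hn.1⟩
  · intro x hx
    simp only [List.mem_toFinset, List.mem_filter, decide_eq_true_eq] at hx
    show ((x.toNat : Int)) = x
    rw [Int.toNat_of_nonneg hx.2.1]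
  · intro n _
    show ((n : Int)).toNat = n
    exact Int.toNat_natCast n
  · intro x _
    rfl

-- ===== VERDICT (by name: the statement is the Claim_ definition above) =====
theorem set_field_ids_spec : Claim_equal_set_field_ids := by
  intro field_ids _
  unfold Spec_set_field_ids
  rw [set_field_ids_as_sum, set_field_ids_alt_as_sum]
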